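-- pv_equiv track=rewrite | github.com/pagefaultgames/pokerogue | src/locales/tools/fusion-affixes-generator.py | find_prefixes
-- ===== SOURCE A (Python) =====
-- def find_prefixes(pokemon_name):
--     result = []
--     processed = {}  # This dictionary will keep track of the names that have been processed
--     for word in pokemon_name:
--         base_word = word  # Treat regional variants as separate entries
--         if base_word not in processed:  # Only process the name if it hasn't been processed before
--             prefix = ""
--             for other_word in pokemon_name:
--                 other_base_word = other_word
--                 if base_word != other_base_word:
--                     temp_prefix = ""
--                     for w, o in zip(base_word, other_base_word):
--                         if w == o:
--                             temp_prefix += w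
--                         else:
--                             break
--                     if len(temp_prefix) > len(prefix):
--                         prefix = temp_prefix
--             # Check if the longest shared prefix is the entire species name
--             if len(prefix) == len(base_word):
--                 processed[base_word] = prefix
--             else:
--                 # Add the next character in the name to the 'root' of the prefix
--                 root = prefix + base_word[len(prefix)]
--                 # If the root of the prefix ends in a consonant, that should be the result
--                 if root[-1].lower() in "bcdfghjklmnpqrstvwxzçßñ":
--                     processed[base_word] = root
--                 elif len(root) >= 6:  # Check if the 'root' is 6 characters or longer
--                     processed[base_word] = root
--                 else:  # Try to create an extension to the next consonant
--                     extension = ""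
--                     for char in base_word[len(root):]:
--                         extension += char
--                         if char.lower() in "bcdfghjklmnpqrstvwxzçßñ":
--                             break
--                     # Check if the root+extension will be longer than 6 characters
--                     if len(root + extension) > 6:
--                         processed[base_word] = root
--                     else:
--                         processed[base_word] = root + extension
--         result.append(processed[base_word])
--     return result
-- ===== SOURCE B (Python) =====
-- # B: one pass builds a counter of every prefix of every word; each word's longest
-- # shared prefix with a distinct other word is then found by a local scan over its
-- # own prefixes, instead of A's pairwise O(n^2) comparison.
-- def find_prefixes(pokemon_name):
--     CONS = "bcdfghjklmnpqrstvwxzçßñ"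
--     pref_count = {}
--     for w in pokemon_name:
--         for k in range(len(w) + 1):
--             p = w[:k]
--             pref_count[p] = pref_count.get(p, 0) + 1
--     word_count = {}
--     for w in pokemon_name:
--         word_count[w] = word_count.get(w, 0) + 1
--
--     def affix(w):
--         # largest k such that w[:k] is also a prefix of some word != w
--         k = 0
--         for j in range(len(w), -1, -1):
--             if pref_count[w[:j]] > word_count[w]:
--                 k = j
--                 break
--         if k == len(w):
--             return w
--         root = w[:k + 1]
--         if w[k].lower() in CONS or len(root) >= 6:
--             return root
--         rest = w[k + 1:]
--         stop = next((i for i, c in enumerate(rest) if c.lower() in CONS), None)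
--         ext = rest if stop is None else rest[:stop + 1]
--         return root if len(root + ext) > 6 else root + ext
--
--     return [affix(w) for w in pokemon_name]
-- ===== Notes on version B (the rewrite author's own statement) =====
-- stated objective: faster
-- what changed: B replaces A's all-pairs longest-common-prefix search with a dictionary counting every prefix of every name built in one pass; each name's longest prefix shared with a distinct other name is then read off by scanning that name's own prefixes in the counter, and the per-name root/extension step is applied once per list entry via slices instead of A's character-accumulating loops.
import Mathlib
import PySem

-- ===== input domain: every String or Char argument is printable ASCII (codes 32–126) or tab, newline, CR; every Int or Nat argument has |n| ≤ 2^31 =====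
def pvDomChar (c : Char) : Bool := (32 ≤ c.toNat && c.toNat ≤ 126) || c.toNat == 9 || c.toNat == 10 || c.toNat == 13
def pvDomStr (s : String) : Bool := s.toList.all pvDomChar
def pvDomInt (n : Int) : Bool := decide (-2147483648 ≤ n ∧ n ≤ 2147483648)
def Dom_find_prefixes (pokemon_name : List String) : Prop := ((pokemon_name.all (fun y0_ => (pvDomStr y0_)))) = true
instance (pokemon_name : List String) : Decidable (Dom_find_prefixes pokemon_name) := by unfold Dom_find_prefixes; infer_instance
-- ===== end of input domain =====

-- B replaces A's O(n^2·L) all-pairs prefix comparison by a counter of every prefix of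
-- every name built in one pass (O(n·L^2)): each name's longest prefix shared with a
-- distinct other name is found by scanning its own prefixes in that counter.

-- shared by both ports: the test `c.lower() in "bcdfghjklmnpqrstvwxzçßñ"` both Pythons perform per character
def pvConsonants : List Char := "bcdfghjklmnpqrstvwxzçßñ".toList
def pvIsCons (c : Char) : Bool := PySem.Chars.isIn (PySem.Chars.lower [c]) pvConsonants

-- ===== PORT A =====
-- A's innermost loop: `for w, o in zip(base, other): …` building temp_prefix, break on mismatch
def pvTempPrefix : List Char → List Char → List Char → List Char
  | w :: ws, o :: os, acc => if w == o then pvTempPrefix ws os (acc ++ [w]) else acc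
  | _, _, acc => acc

-- A's middle loop: the longest prefix shared with a distinct other name
def pvBestPrefix (pokemon_name : List String) (base : List Char) : List Char :=
  pokemon_name.foldl
    (fun prefx other =>
      if base ≠ other.toList then
        let temp := pvTempPrefix base other.toList []
        if prefx.length < temp.length then temp else prefx
      else prefx) []

-- A's extension loop: `for char in base[len(root):]: extension += char; if cons: break`
def pvExtLoopA : List Char → List Char → List Char
  | [], ext => ext
  | c :: cs, ext => if pvIsCons c then ext ++ [c] else pvExtLoopA cs (ext ++ [c])

-- A's processing of one name given its longest shared prefix
def pvProcessA (base prefx : List Char) : List Char :=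
  if prefx.length == base.length then prefx
  else
    match PySem.List.pyGet? base (prefx.length : Int) with
    | none => []  -- unreachable: here prefx is a proper prefix of base (Python IndexError otherwise)
    | some c =>
      let root := prefx ++ [c]
      match PySem.List.pyGet? root (-1) with
      | none => []  -- unreachable: root is nonempty
      | some last =>
        if pvIsCons last then root
        else if 6 ≤ root.length then root
        else
          let ext := pvExtLoopA (PySem.List.slice base (some (root.length : Int)) none) []
          if 6 < (root ++ ext).length then root else root ++ ext

def find_prefixes (pokemon_name : List String) : List String :=
  (pokemon_name.foldl
    (fun (st : List String × PySem.Dict String String) word =>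
      let processed :=
        if st.2.contains word then st.2
        else st.2.insert word
          (String.ofList (pvProcessA word.toList (pvBestPrefix pokemon_name word.toList)))
      (st.1 ++ [processed.getD word ""], processed))
    ([], PySem.Dict.empty)).1

-- ===== PORT B =====
-- B: counter of every prefix of every name (`pref_count[p] = pref_count.get(p, 0) + 1`)
def pvPrefCount (pokemon_name : List String) : PySem.Dict String Int :=
  pokemon_name.foldl
    (fun d w =>
      (PySem.List.pyRange 0 ((w.toList.length : Int) + 1) 1).foldl
        (fun d k =>
          let p := String.ofList (PySem.List.slice w.toList none (some k))
          d.insert p (d.getD p 0 + 1)) d)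
    PySem.Dict.empty

-- B: multiplicity of each name (`word_count`)
def pvWordCount (pokemon_name : List String) : PySem.Dict String Int :=
  pokemon_name.foldl (fun d w => d.insert w (d.getD w 0 + 1)) PySem.Dict.empty

-- B: `for j in range(len(w), -1, -1): if pref_count[w[:j]] > word_count[w]: k = j; break`
def pvScanK (pc : PySem.Dict String Int) (cw : Int) (w : List Char) : List Int → Int
  | [] => 0
  | j :: js =>
    if cw < pc.getD (String.ofList (PySem.List.slice w none (some j))) 0 then j
    else pvScanK pc cw w js

-- B: per-name affix from the counters
def pvAffixB (pc : PySem.Dict String Int) (cw : Int) (w : List Char) : List Char :=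
  let k := pvScanK pc cw w (PySem.List.pyRange (w.length : Int) (-1) (-1))
  if k == (w.length : Int) then w
  else
    match PySem.List.pyGet? w k with
    | none => []  -- unreachable: here 0 ≤ k < len w
    | some c =>
      let root := PySem.List.slice w none (some (k + 1))
      if pvIsCons c || 6 ≤ root.length then root
      else
        let rest := PySem.List.slice w (some (k + 1)) none
        let ext := match rest.findIdx? pvIsCons with
                   | none => rest
                   | some i => rest.take (i + 1)
        if 6 < (root ++ ext).length then root else root ++ ext

def find_prefixes_alt (pokemon_name : List String) : List String :=
  let pc := pvPrefCount pokemon_name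
  let wc := pvWordCount pokemon_name
  pokemon_name.map (fun w => String.ofList (pvAffixB pc (wc.getD w 0) w.toList))

-- ===== PRECONDITION & SPEC =====
def Spec_find_prefixes (pokemon_name : List String) (out : List String) : Prop := out = find_prefixes_alt pokemon_name
instance (pokemon_name : List String) (out : List String) : Decidable (Spec_find_prefixes pokemon_name out) := by unfold Spec_find_prefixes; infer_instance

-- ===== CLAIM (what is proved, stated in full; the proofs are below) =====
def Claim_equal_find_prefixes : Prop := ∀ (pokemon_name : List String), Dom_find_prefixes pokemon_name → Spec_find_prefixes pokemon_name (find_prefixes pokemon_name)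

-- ===== LEMMAS AND PROOFS =====

-- length of the longest common prefix of two character lists
def pvLcpLen : List Char → List Char → Nat
  | a :: as, b :: bs => if a = b then pvLcpLen as bs + 1 else 0
  | _, _ => 0

theorem pvLcpLen_le_left (a b : List Char) : pvLcpLen a b ≤ a.length := by
  induction a generalizing b with
  | nil => simp [pvLcpLen]
  | cons x xs ih =>
    cases b with
    | nil => simp [pvLcpLen]
    | cons y ys =>
      simp only [pvLcpLen, List.length_cons]
      split <;> simp [Nat.succ_le_succ (ih ys)]

theorem pvTempPrefix_eq (a b acc : List Char) :
    pvTempPrefix a b acc = acc ++ a.take (pvLcpLen a b) := by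
  induction a generalizing b acc with
  | nil => cases b <;> simp [pvTempPrefix, pvLcpLen]
  | cons x xs ih =>
    cases b with
    | nil => simp [pvTempPrefix, pvLcpLen]
    | cons y ys =>
      simp only [pvTempPrefix, pvLcpLen]
      by_cases h : x = y
      · simp [h, ih]
      · simp [h]

theorem pvTake_prefix_iff (a b : List Char) (k : Nat) (hk : k ≤ a.length) :
    a.take k <+: b ↔ k ≤ pvLcpLen a b := by
  induction a generalizing b k with
  | nil => simp_all
  | cons x xs ih =>
    cases k with
    | zero => simp
    | succ k' =>
      cases b with
      | nil => simp [pvLcpLen, List.prefix_nil]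
      | cons y ys =>
        simp only [List.take_succ_cons, List.cons_prefix_cons, pvLcpLen]
        by_cases h : x = y
        · simp only [h, true_and, reduceIte]
          rw [ih ys k' (by simpa using hk)]
          omega
        · simp [h]

-- A's middle loop, numerically: the max lcp length with a distinct other name
def pvM (pokemon_name : List String) (w : List Char) : Nat :=
  pokemon_name.foldl
    (fun m o => if w ≠ o.toList then (if m < pvLcpLen w o.toList then pvLcpLen w o.toList else m) else m) 0

theorem pvMfold_le (L : List String) (w : List Char) (m : Nat) (hm : m ≤ w.length) :
    L.foldl (fun m o => if w ≠ o.toList then (if m < pvLcpLen w o.toList then pvLcpLen w o.toList else m) else m) m ≤ w.length := by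
  induction L generalizing m with
  | nil => simpa
  | cons o L ih =>
    simp only [List.foldl_cons]
    apply ih
    by_cases h : w ≠ o.toList
    · simp only [if_pos h]
      split
      · exact pvLcpLen_le_left w o.toList
      · exact hm
    · simp only [if_neg h]; exact hm

theorem pvM_le (pokemon_name : List String) (w : List Char) : pvM pokemon_name w ≤ w.length :=
  pvMfold_le pokemon_name w 0 (Nat.zero_le _)

theorem pvBestPrefix_fold (L : List String) (w : List Char) (m : Nat) (hm : m ≤ w.length) :
    L.foldl
      (fun prefx other =>
        if w ≠ other.toList then
          let temp := pvTempPrefix w other.toList []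
          if prefx.length < temp.length then temp else prefx
        else prefx) (w.take m)
    = w.take (L.foldl (fun m o => if w ≠ o.toList then (if m < pvLcpLen w o.toList then pvLcpLen w o.toList else m) else m) m) := by
  induction L generalizing m with
  | nil => simp
  | cons o L ih =>
    simp only [List.foldl_cons]
    by_cases h : w = o.toList
    · have hc : ¬ (w ≠ o.toList) := by simpa using h
      simp only [if_neg hc]
      exact ih m hm
    · have hlen : (w.take m).length = m := by simp [hm]
      have htemp : pvTempPrefix w o.toList [] = w.take (pvLcpLen w o.toList) := by
        simpa using pvTempPrefix_eq w o.toList []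
      simp only [if_pos (h : w ≠ o.toList), htemp, hlen, List.length_take,
        Nat.min_eq_left (pvLcpLen_le_left w o.toList)]
      by_cases hlt : m < pvLcpLen w o.toList
      · rw [if_pos hlt, if_pos hlt]
        exact ih _ (pvLcpLen_le_left w o.toList)
      · rw [if_neg hlt, if_neg hlt]
        exact ih m hm

theorem pvBestPrefix_eq (pokemon_name : List String) (w : List Char) :
    pvBestPrefix pokemon_name w = w.take (pvM pokemon_name w) := by
  have := pvBestPrefix_fold pokemon_name w 0 (Nat.zero_le _)
  simpa [pvBestPrefix, pvM] using this

theorem pvMfold_mono (L : List String) (w : List Char) (m : Nat) :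
    m ≤ L.foldl (fun m o => if w ≠ o.toList then (if m < pvLcpLen w o.toList then pvLcpLen w o.toList else m) else m) m := by
  induction L generalizing m with
  | nil => simp
  | cons o L ih =>
    simp only [List.foldl_cons]
    refine le_trans ?_ (ih _)
    by_cases h : w ≠ o.toList
    · simp only [if_pos h]
      split <;> omega
    · simp only [if_neg h]
      exact le_rfl

theorem pvM_is_max (pokemon_name : List String) (w : List Char) :
    ∀ o ∈ pokemon_name, w ≠ o.toList → pvLcpLen w o.toList ≤ pvM pokemon_name w := by
  unfold pvM
  generalize (0 : Nat) = m
  induction pokemon_name generalizing m with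
  | nil => simp
  | cons x L ih =>
    intro o ho hne
    simp only [List.mem_cons] at ho
    rcases ho with rfl | ho
    · simp only [List.foldl_cons, if_pos hne]
      refine le_trans ?_ (pvMfold_mono L w _)
      split <;> omega
    · exact ih _ o ho hne

theorem pvM_achieved (pokemon_name : List String) (w : List Char) :
    pvM pokemon_name w = 0 ∨
      ∃ o ∈ pokemon_name, w ≠ o.toList ∧ pvM pokemon_name w = pvLcpLen w o.toList := by
  unfold pvM
  have H : ∀ (L : List String) (m : Nat),
      L.foldl (fun m o => if w ≠ o.toList then (if m < pvLcpLen w o.toList then pvLcpLen w o.toList else m) else m) m = m ∨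
      ∃ o ∈ L, w ≠ o.toList ∧
        L.foldl (fun m o => if w ≠ o.toList then (if m < pvLcpLen w o.toList then pvLcpLen w o.toList else m) else m) m = pvLcpLen w o.toList := by
    intro L
    induction L with
    | nil => intro m; left; rfl
    | cons x L ih =>
      intro m
      simp only [List.foldl_cons]
      by_cases h : w = x.toList
      · rcases ih m with h1 | ⟨o, ho, hne, he⟩
        · left; simpa [h] using h1
        · right; exact ⟨o, List.mem_cons_of_mem _ ho, hne, by simpa [h] using he⟩
      · by_cases hlt : m < pvLcpLen w x.toList
        · rcases ih (pvLcpLen w x.toList) with h1 | ⟨o, ho, hne, he⟩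
          · right
            refine ⟨x, List.mem_cons_self, h, ?_⟩
            simpa [h, hlt] using h1
          · right; exact ⟨o, List.mem_cons_of_mem _ ho, hne, by simpa [h, hlt] using he⟩
        · rcases ih m with h1 | ⟨o, ho, hne, he⟩
          · left; simpa [h, hlt] using h1
          · right; exact ⟨o, List.mem_cons_of_mem _ ho, hne, by simpa [h, hlt] using he⟩
  rcases H pokemon_name 0 with h | h
  · left; exact h
  · right; exact h

theorem pvInner_eq (w : String) (d : PySem.Dict String Int) :
    (PySem.List.pyRange 0 ((w.toList.length : Int) + 1) 1).foldl
        (fun d k =>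
          let p := String.ofList (PySem.List.slice w.toList none (some k))
          d.insert p (d.getD p 0 + 1)) d
    = ((List.range (w.toList.length + 1)).map (fun k => String.ofList (w.toList.take k))).foldl
        (fun d p => d.insert p (d.getD p 0 + 1)) d := by
  rw [List.foldl_map]
  have h1 : ((w.toList.length : Int) + 1) = ((w.toList.length + 1 : Nat) : Int) := by push_cast; ring
  rw [h1, PySem.List.pyRange_zero_nat, List.foldl_map]
  apply PySem.List.foldl_congr_mem
  intro d' k hk
  simp only [PySem.List.slice_to_natCast]

-- the prefixes of a name are pairwise distinct

theorem pvPrefixes_nodup (w : String) :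
    ((List.range (w.toList.length + 1)).map (fun k => String.ofList (w.toList.take k))).Nodup := by
  apply List.Nodup.map_on ?_ (List.nodup_range)
  intro k hk k' hk' h
  simp only [List.mem_range] at hk hk'
  have := congrArg (fun s => s.toList.length) h
  simp only [String.toList_ofList, List.length_take] at this
  omega

theorem pvMem_prefixes (w : String) (p : List Char) :
    String.ofList p ∈ ((List.range (w.toList.length + 1)).map (fun k => String.ofList (w.toList.take k)))
      ↔ p <+: w.toList := by
  simp only [List.mem_map, List.mem_range]
  constructor
  · rintro ⟨k, hk, h⟩
    rw [String.ofList_inj] at h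
    rw [← h]
    exact List.take_prefix k w.toList
  · intro hp
    refine ⟨p.length, ?_, ?_⟩
    · have := hp.length_le; omega
    · exact congrArg String.ofList (List.prefix_iff_eq_take.mp hp).symm

theorem pvCount_prefixes (w : String) (p : List Char) :
    ((List.range (w.toList.length + 1)).map (fun k => String.ofList (w.toList.take k))).count (String.ofList p)
      = if p <+: w.toList then 1 else 0 := by
  by_cases hp : p <+: w.toList
  · rw [if_pos hp]
    exact List.count_eq_one_of_mem (pvPrefixes_nodup w) ((pvMem_prefixes w p).mpr hp)
  · rw [if_neg hp]
    exact List.count_eq_zero.mpr (fun hm => hp ((pvMem_prefixes w p).mp hm))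

theorem pvPrefCount_getD (pokemon_name : List String) (p : List Char) :
    (pvPrefCount pokemon_name).getD (String.ofList p) 0
      = (pokemon_name.countP (fun y => decide (p <+: y.toList)) : Int) := by
  unfold pvPrefCount
  have H : ∀ (L : List String) (d : PySem.Dict String Int),
      (L.foldl (fun d w =>
        (PySem.List.pyRange 0 ((w.toList.length : Int) + 1) 1).foldl
          (fun d k =>
            let p := String.ofList (PySem.List.slice w.toList none (some k))
            d.insert p (d.getD p 0 + 1)) d) d).getD (String.ofList p) 0
      = d.getD (String.ofList p) 0 + (L.countP (fun y => decide (p <+: y.toList)) : Int) := by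
    intro L
    induction L with
    | nil => intro d; simp
    | cons w L ih =>
      intro d
      simp only [List.foldl_cons]
      rw [ih, pvInner_eq, PySem.Dict.getD_foldl_insert_add_one, pvCount_prefixes]
      rw [List.countP_cons]
      by_cases hp : p <+: w.toList
      · simp [hp]
        ring
      · simp [hp]
  rw [H]
  simp

theorem pvWordCount_getD (pokemon_name : List String) (w : String) :
    (pvWordCount pokemon_name).getD w 0 = (pokemon_name.count w : Int) := by
  unfold pvWordCount
  rw [PySem.Dict.foldl_insert_getD_add_one_eq_counter, PySem.Dict.getD_counter]

theorem pvCount_lt_countP_iff (pokemon_name : List String) (w : String) (p : List Char)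
    (hp : p <+: w.toList) :
    ((pokemon_name.count w : Int) < (pokemon_name.countP (fun y => decide (p <+: y.toList)) : Int))
      ↔ ∃ y ∈ pokemon_name, y ≠ w ∧ p <+: y.toList := by
  rw [Nat.cast_lt]
  have hle : ∀ (M : List String), M.count w ≤ M.countP (fun y => decide (p <+: y.toList)) := by
    intro M
    apply List.countP_mono_left
    intro a _ ha
    simp only [beq_iff_eq] at ha
    subst ha
    simpa using hp
  induction pokemon_name with
  | nil => simp
  | cons x L ih =>
    rw [List.count_cons, List.countP_cons]
    by_cases hx : x = w
    · subst hx
      simp only [beq_self_eq_true, hp, decide_true, List.mem_cons, reduceIte]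
      constructor
      · intro h
        obtain ⟨y, hy, hne, hpy⟩ := ih.mp (by omega)
        exact ⟨y, Or.inr hy, hne, hpy⟩
      · rintro ⟨y, rfl | hy, hne, hpy⟩
        · exact absurd rfl hne
        · have := ih.mpr ⟨y, hy, hne, hpy⟩; omega
    · have hb : (x == w) = false := by simp [hx]
      simp only [hb, Bool.false_eq_true, reduceIte, List.mem_cons, Nat.add_zero]
      by_cases hpx : p <+: x.toList
      · simp only [hpx, decide_true, reduceIte]
        constructor
        · intro _
          exact ⟨x, Or.inl rfl, hx, hpx⟩
        · intro _
          have := hle L; omega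
      · simp only [hpx, decide_false]
        constructor
        · intro h
          obtain ⟨y, hy, hne, hpy⟩ := ih.mp h
          exact ⟨y, Or.inr hy, hne, hpy⟩
        · rintro ⟨y, rfl | hy, hne, hpy⟩
          · exact absurd hpy hpx
          · exact ih.mpr ⟨y, hy, hne, hpy⟩

-- names ≠ w sharing the length-j prefix of w
def pvQ (L : List String) (w : List Char) (j : Nat) : Prop :=
  ∃ y ∈ L, y ≠ String.ofList w ∧ w.take j <+: y.toList

theorem pvQ_zero_of (L : List String) (w : List Char) (j : Nat) (h : pvQ L w j) : pvQ L w 0 := by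
  obtain ⟨y, hy, hne, _⟩ := h
  exact ⟨y, hy, hne, by simp⟩

theorem pvQ_le_pvM (L : List String) (w : List Char) (j : Nat) (hj : j ≤ w.length)
    (h : pvQ L w j) : j ≤ pvM L w := by
  obtain ⟨y, hy, hne, hpf⟩ := h
  have hne' : w ≠ y.toList := by
    intro he; apply hne; rw [he, String.ofList_toList]
  exact le_trans ((pvTake_prefix_iff w y.toList j hj).mp hpf) (pvM_is_max L w y hy hne')

theorem pvQ_pvM (L : List String) (w : List Char) (h0 : pvQ L w 0) : pvQ L w (pvM L w) := by
  rcases pvM_achieved L w with h | ⟨o, ho, hne, he⟩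
  · rw [h]; exact h0
  · refine ⟨o, ho, ?_, ?_⟩
    · intro heq; apply hne; rw [heq]; simp
    · rw [pvTake_prefix_iff w o.toList _ (pvM_le L w), he]

theorem pvM_eq_zero (L : List String) (w : List Char) (h : ∀ o ∈ L, w = o.toList) :
    pvM L w = 0 := by
  induction L with
  | nil => rfl
  | cons o L ih =>
    unfold pvM
    simp only [List.foldl_cons]
    rw [if_neg (by simp [h o List.mem_cons_self])]
    exact ih (fun o ho => h o (List.mem_cons_of_mem _ ho))

-- the scan condition at index j is exactly pvQ

theorem pvCond_iff (L : List String) (w : List Char) (j : Nat) :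
    ((pvWordCount L).getD (String.ofList w) 0
        < (pvPrefCount L).getD (String.ofList (PySem.List.slice w none (some (j : Int)))) 0)
      ↔ pvQ L w j := by
  rw [PySem.List.slice_to_natCast, pvPrefCount_getD, pvWordCount_getD]
  exact pvCount_lt_countP_iff L (String.ofList w) (w.take j) (by simp [List.take_prefix])

theorem pvScan_main (L : List String) (w : List Char) (n : Nat) (hn : n ≤ w.length)
    (habove : ∀ j : Nat, j ≤ w.length → n < j → ¬ pvQ L w j) :
    pvScanK (pvPrefCount L) ((pvWordCount L).getD (String.ofList w) 0) w
        (PySem.List.pyRange (n : Int) (-1) (-1))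
      = (pvM L w : Int) := by
  induction n with
  | zero =>
    rw [PySem.List.pyRange_neg_one_cons (by norm_num)]
    simp only [pvScanK]
    by_cases hq : pvQ L w 0
    · rw [if_pos ((pvCond_iff L w 0).mpr hq)]
      have h1 : pvM L w ≤ 0 := by
        by_contra hc
        exact habove (pvM L w) (pvM_le L w) (by omega) (pvQ_pvM L w hq)
      simp [Nat.le_zero.mp h1]
    · rw [if_neg (fun hc => hq ((pvCond_iff L w 0).mp hc))]
      have : pvM L w = 0 := by
        apply pvM_eq_zero
        intro o ho
        by_contra hne
        apply hq
        refine ⟨o, ho, ?_, by simp⟩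
        intro heq; apply hne; rw [heq]; simp
      rw [(by norm_num : ((0 : Nat) : Int) - 1 = -1), PySem.List.pyRange_neg_one_eq_nil (by norm_num)]
      simp [pvScanK, this]
  | succ m ih =>
    rw [PySem.List.pyRange_neg_one_cons (by push_cast; omega)]
    simp only [pvScanK]
    by_cases hq : pvQ L w (m + 1)
    · rw [if_pos (by exact_mod_cast (pvCond_iff L w (m + 1)).mpr hq)]
      have h1 : m + 1 ≤ pvM L w := pvQ_le_pvM L w (m + 1) hn hq
      have h2 : pvM L w ≤ m + 1 := by
        by_contra hc
        exact habove (pvM L w) (pvM_le L w) (by omega) (pvQ_pvM L w (pvQ_zero_of L w _ hq))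
      have : pvM L w = m + 1 := le_antisymm h2 h1
      rw [this]
    · rw [if_neg (fun hc => hq ((pvCond_iff L w (m + 1)).mp (by exact_mod_cast hc)))]
      have : ((m + 1 : Nat) : Int) - 1 = ((m : Nat) : Int) := by push_cast; ring
      rw [this]
      apply ih (by omega)
      intro j hj hmj
      by_cases hj1 : j = m + 1
      · rw [hj1]; exact hq
      · exact habove j hj (by omega)

theorem pvExtLoopA_eq (rest acc : List Char) :
    pvExtLoopA rest acc
      = acc ++ (match rest.findIdx? pvIsCons with
                | none => rest
                | some i => rest.take (i + 1)) := by
  induction rest generalizing acc with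
  | nil => simp [pvExtLoopA]
  | cons c cs ih =>
    simp only [pvExtLoopA, List.findIdx?_cons]
    by_cases h : pvIsCons c
    · simp [h]
    · simp only [h, Bool.false_eq_true, ih]
      cases hf : cs.findIdx? pvIsCons <;> simp

theorem pvProcess_eq (pokemon_name : List String) (w : List Char) :
    pvAffixB (pvPrefCount pokemon_name) ((pvWordCount pokemon_name).getD (String.ofList w) 0) w
      = pvProcessA w (w.take (pvM pokemon_name w)) := by
  have hM := pvM_le pokemon_name w
  have hscan := pvScan_main pokemon_name w w.length le_rfl (fun j hj hlt _ => by omega)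
  unfold pvAffixB pvProcessA
  rw [hscan]
  have hlen : (w.take (pvM pokemon_name w)).length = pvM pokemon_name w := by simp [hM]
  rw [hlen]
  by_cases heq : pvM pokemon_name w = w.length
  · rw [if_pos (by simp [heq]), if_pos (by simp [heq]), heq, List.take_length]
  · rw [if_neg (by simpa using fun h => heq (by exact_mod_cast h)),
        if_neg (by simpa using heq)]
    have hlt : pvM pokemon_name w < w.length := lt_of_le_of_ne hM heq
    set M := pvM pokemon_name w with hMdef
    have hget : PySem.List.pyGet? w (M : Int) = some w[M] := by
      rw [PySem.List.pyGet?_natCast]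
      exact List.getElem?_eq_getElem hlt
    rw [hget]
    dsimp only
    have hroot : w.take M ++ [w[M]] = w.take (M + 1) :=
      (List.take_succ_eq_append_getElem hlt).symm
    have hrootB : PySem.List.slice w none (some ((M : Int) + 1)) = w.take (M + 1) := by
      have : ((M : Int) + 1) = ((M + 1 : Nat) : Int) := by push_cast; ring
      rw [this, PySem.List.slice_to_natCast]
    have hlast : PySem.List.pyGet? (w.take M ++ [w[M]]) (-1) = some w[M] := by
      rw [PySem.List.pyGet?_neg_one, List.getLast?_concat]
    rw [hlast, hrootB, hroot]
    have hrootlen : (w.take (M + 1)).length = M + 1 := by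
      simp [Nat.succ_le_of_lt hlt]
    have hrest : PySem.List.slice w (some ((w.take (M + 1)).length : Int)) none
        = PySem.List.slice w (some ((M : Int) + 1)) none := by
      rw [hrootlen]; norm_num
    by_cases hc : pvIsCons w[M]
    · simp [hc]
    · simp only [hc, Bool.false_or]
      by_cases h6 : 6 ≤ (w.take (M + 1)).length
      · rw [if_pos (by simpa using h6), if_pos h6]
        simp
      · rw [if_neg (by simpa using h6), if_neg h6]
        rw [hrest]
        have : ((M : Int) + 1) = ((M + 1 : Nat) : Int) := by push_cast; ring
        rw [this, PySem.List.slice_from_natCast, pvExtLoopA_eq, List.nil_append]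
        rfl

theorem pvOuterA_fold (L' : List String) (F : String → String) (res : List String)
    (d : PySem.Dict String String)
    (hinv : ∀ s, d.contains s = true → d.getD s "" = F s) :
    (L'.foldl (fun (st : List String × PySem.Dict String String) word =>
      let processed := if st.2.contains word then st.2 else st.2.insert word (F word)
      (st.1 ++ [processed.getD word ""], processed)) (res, d)).1
    = res ++ L'.map F := by
  induction L' generalizing res d with
  | nil => simp
  | cons word L ih =>
    simp only [List.foldl_cons, List.map_cons]
    by_cases hc : d.contains word = true
    · rw [if_pos hc]
      rw [ih (res ++ [d.getD word ""]) d hinv, hinv word hc]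
      simp
    · rw [if_neg hc]
      rw [ih (res ++ [(d.insert word (F word)).getD word ""]) (d.insert word (F word)) ?_,
          PySem.Dict.getD_insert_self]
      · simp
      · intro s hs
        rw [PySem.Dict.getD_insert]
        by_cases hsw : s = word
        · rw [if_pos hsw, hsw]
        · rw [if_neg hsw]
          apply hinv
          rw [PySem.Dict.contains_insert] at hs
          simpa [hsw] using hs

theorem pvOuterA_eq (pokemon_name : List String) :
    find_prefixes pokemon_name
      = pokemon_name.map
          (fun word => String.ofList (pvProcessA word.toList (pvBestPrefix pokemon_name word.toList))) := by
  unfold find_prefixes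
  rw [pvOuterA_fold pokemon_name
      (fun word => String.ofList (pvProcessA word.toList (pvBestPrefix pokemon_name word.toList)))
      [] PySem.Dict.empty (fun s hs => by simp [PySem.Dict.contains_empty] at hs)]
  simp

-- ===== VERDICT (by name: the statement is the Claim_ definition above) =====
theorem find_prefixes_spec : Claim_equal_find_prefixes := by
  intro pokemon_name _
  unfold Spec_find_prefixes
  rw [pvOuterA_eq]
  unfold find_prefixes_alt
  simp only []
  apply List.map_congr_left
  intro w _
  rw [pvBestPrefix_eq]
  have h := pvProcess_eq pokemon_name w.toList
  rw [String.ofList_toList] at h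
  rw [← h]
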